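-- pv_equiv track=rewrite | github.com/MrBrantCode/unitest_baseline | mut_generate/mist_train_cf/cf_84512/solution.py | rangeSum
-- ===== SOURCE A (Python) =====
-- def rangeSum(nums, n, left, right):
--     """
--     Calculate the sum of elements from index `left` to `right` in the array
--     formed by sorting the sums of all non-empty continuous subarrays derived
--     from `nums`. Return the result modulo `10^9 + 7`.
--
--     Args:
--     nums (list): A list of `n` positive integers.
--     n (int): The number of elements in `nums`.
--     left (int): The start index (1-indexed).
--     right (int): The end index (1-indexed).
--
--     Returns:
--     int: The sum of elements from index `left` to `right` modulo `10^9 + 7`.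
--     """
--     arr = []
--     mod = 10**9 + 7
--     for i in range(n):
--         s = 0
--         for j in range(i, n):
--             s += nums[j]
--             arr.append(s)
--     arr.sort()
--     res = 0
--     for i in range(left-1, right):
--         res = (res + arr[i]) % mod
--     return res
-- ===== SOURCE B (Python) =====
-- def rangeSum(nums, n, left, right):
--     mod = 10**9 + 7
--
--     def merge(a, b):
--         i = j = 0
--         out = []
--         while i < len(a) and j < len(b):
--             if a[i] <= b[j]:
--                 out.append(a[i]); i += 1
--             else:
--                 out.append(b[j]); j += 1
--         out.extend(a[i:])
--         out.extend(b[j:])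
--         return out
--
--     def msort(xs):
--         if len(xs) <= 1:
--             return xs
--         m = len(xs) // 2
--         return merge(msort(xs[:m]), msort(xs[m:]))
--
--     def solve(lo, hi):
--         # sorted list of the sums of all non-empty contiguous subarrays of nums[lo:hi]
--         if hi - lo <= 0:
--             return []
--         if hi - lo == 1:
--             return [nums[lo]]
--         mid = (lo + hi) // 2
--         left_part = solve(lo, mid)
--         right_part = solve(mid, hi)
--         # subarrays crossing mid: (suffix sum of nums[k:mid]) + (prefix sum of nums[mid:e])
--         suf = []
--         s = 0
--         for k in range(mid - 1, lo - 1, -1):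
--             s += nums[k]
--             suf.append(s)
--         pre = []
--         s = 0
--         for e in range(mid, hi):
--             s += nums[e]
--             pre.append(s)
--         pre = msort(pre)
--         rows = [[s0 + p for p in pre] for s0 in suf]
--         while len(rows) > 1:
--             merged = []
--             k = 0
--             while k + 1 < len(rows):
--                 merged.append(merge(rows[k], rows[k + 1]))
--                 k += 2
--             if k < len(rows):
--                 merged.append(rows[k])
--             rows = merged
--         cross = rows[0] if rows else []
--         return merge(merge(left_part, right_part), cross)
--
--     arr = solve(0, n)
--     res = 0
--     for i in range(left - 1, right):
--         res = res + arr[i]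
--     return res % mod
-- ===== Notes on version B (the rewrite author's own statement) =====
-- stated objective: alternative
-- what changed: B replaces A's flat enumerate-all-subarray-sums-then-builtin-sort scheme with a divide-and-conquer on the array: it recursively computes the sorted subarray sums of each half and combines them with the sorted crossing sums (built from suffix/prefix running sums and pairwise-merged sorted rows) using hand-written two-pointer merges, with a single final modulo instead of A's per-step modular fold (the hinted binary-search/sliding-window scheme was not used because it is only correct for positive nums, while the domain admits negatives).
import Mathlib
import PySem

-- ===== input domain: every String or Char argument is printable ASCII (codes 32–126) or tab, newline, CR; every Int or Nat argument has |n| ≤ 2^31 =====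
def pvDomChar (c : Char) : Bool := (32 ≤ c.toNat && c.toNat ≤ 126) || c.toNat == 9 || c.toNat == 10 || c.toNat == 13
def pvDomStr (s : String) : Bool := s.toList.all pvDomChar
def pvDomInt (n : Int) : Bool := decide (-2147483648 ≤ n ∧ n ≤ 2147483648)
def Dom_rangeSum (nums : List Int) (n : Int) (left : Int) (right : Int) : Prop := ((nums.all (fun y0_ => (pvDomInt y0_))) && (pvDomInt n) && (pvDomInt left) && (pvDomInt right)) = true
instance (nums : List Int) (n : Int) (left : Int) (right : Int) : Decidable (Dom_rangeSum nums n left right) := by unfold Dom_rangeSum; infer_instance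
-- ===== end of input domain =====

-- B replaces A's enumerate-all-then-builtin-sort scheme with a divide-and-conquer on the
-- array: recursively obtain the sorted subarray sums of each half, generate the sorted
-- rows of crossing sums from suffix/prefix sums and combine everything by hand-written
-- merges (objective: alternative; same asymptotic cost).

-- ===== PORT A =====
def rangeSum (nums : List Int) (n : Int) (left : Int) (right : Int) : Int :=
  let arr : List Int :=
    (PySem.List.pyRange 0 n 1).foldl (fun (arr : List Int) i =>
      ((PySem.List.pyRange i n 1).foldl (fun (p : Int × List Int) j =>
          let s := p.1 + PySem.List.pyGetD nums j 0
          (s, p.2 ++ [s])) ((0 : Int), arr)).2) []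
  let arr := PySem.List.sorted arr (fun x => x) false
  (PySem.List.pyRange (left - 1) right 1).foldl
    (fun res i => PySem.Int.mod (res + PySem.List.pyGetD arr i 0) (10 ^ 9 + 7)) 0

-- ===== PORT B =====
-- two-pointer merge of two lists (the while-loop with indices i, j rendered structurally)
def pvMerge : List Int → List Int → List Int
  | [], b => b
  | a :: as, [] => a :: as
  | x :: xs, y :: ys =>
      if x ≤ y then x :: pvMerge xs (y :: ys) else y :: pvMerge (x :: xs) ys
termination_by a b => a.length + b.length

def pvMsort (xs : List Int) : List Int :=
  if xs.length ≤ 1 then xs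
  else pvMerge (pvMsort (xs.take (xs.length / 2))) (pvMsort (xs.drop (xs.length / 2)))
termination_by xs.length
decreasing_by
  · simp [List.length_take]; omega
  · simp [List.length_drop]; omega

-- one round of the pairwise-merging while-loop: merge adjacent rows
def pvPairUp : List (List Int) → List (List Int)
  | a :: b :: rest => pvMerge a b :: pvPairUp rest
  | rs => rs

lemma pvPairUp_length_le (rs : List (List Int)) : (pvPairUp rs).length ≤ rs.length := by
  fun_induction pvPairUp with
  | case1 a b rest ih => simpa using Nat.le_trans ih (by omega)
  | case2 rs _ => exact Nat.le_refl _

-- `while len(rows) > 1: rows = <pair up>`, then `rows[0] if rows else []`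
def pvRounds : List (List Int) → List Int
  | [] => []
  | [r] => r
  | a :: b :: rest => pvRounds (pvMerge a b :: pvPairUp rest)
termination_by rows => rows.length
decreasing_by
  have := pvPairUp_length_le rest
  simp; omega

-- `solve(lo, hi)`: sorted subarray sums of nums[lo:hi] by divide and conquer
def pvSolve (nums : List Int) (lo hi : Int) : List Int :=
  if hi - lo ≤ 0 then []
  else if hi - lo = 1 then [PySem.List.pyGetD nums lo 0]
  else
    let mid := PySem.Int.floordiv (lo + hi) 2
    let L := pvSolve nums lo mid
    let R := pvSolve nums mid hi
    let suf := ((PySem.List.pyRange (mid - 1) (lo - 1) (-1)).foldl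
      (fun (p : Int × List Int) k =>
        let s := p.1 + PySem.List.pyGetD nums k 0
        (s, p.2 ++ [s])) ((0 : Int), [])).2
    let pre := ((PySem.List.pyRange mid hi 1).foldl
      (fun (p : Int × List Int) e =>
        let s := p.1 + PySem.List.pyGetD nums e 0
        (s, p.2 ++ [s])) ((0 : Int), [])).2
    let pre := pvMsort pre
    let rows := suf.map (fun s0 => pre.map (fun p => s0 + p))
    let cross := pvRounds rows
    pvMerge (pvMerge L R) cross
termination_by (hi - lo).toNat
decreasing_by
  all_goals
    have h2 := PySem.Int.floordiv_eq_ediv_of_pos (a := lo + hi) (b := 2) (by norm_num)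
    simp only [h2]
    omega

def rangeSum_alt (nums : List Int) (n : Int) (left : Int) (right : Int) : Int :=
  let arr := pvSolve nums 0 n
  PySem.Int.mod
    ((PySem.List.pyRange (left - 1) right 1).foldl
      (fun res i => res + PySem.List.pyGetD arr i 0) 0) (10 ^ 9 + 7)

-- ===== PRECONDITION & SPEC =====
-- Pre_ is exactly the set of inputs on which the Python A returns (no IndexError):
-- n must not exceed len(nums), and the final index range must be empty or lie within
-- Python's (negative-index-wrapping) bounds of the n*(n+1)/2 subarray sums.
-- (n*(n+1) is even, so Int division by 2 is exact here.)
def Pre_rangeSum (nums : List Int) (n : Int) (left : Int) (right : Int) : Prop :=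
  n ≤ (nums.length : Int) ∧
  (right ≤ left - 1 ∨
    (-(if n ≤ 0 then 0 else n * (n + 1) / 2) ≤ left - 1 ∧
      right ≤ (if n ≤ 0 then (0 : Int) else n * (n + 1) / 2)))
instance (nums : List Int) (n : Int) (left : Int) (right : Int) : Decidable (Pre_rangeSum nums n left right) := by unfold Pre_rangeSum; infer_instance

def pvWitness_rangeSum : List Int × Int × Int × Int := ([1, 2, 3], 3, 1, 6)

def Spec_rangeSum (nums : List Int) (n : Int) (left : Int) (right : Int) (out : Int) : Prop := out = rangeSum_alt nums n left right
instance (nums : List Int) (n : Int) (left : Int) (right : Int) (out : Int) : Decidable (Spec_rangeSum nums n left right out) := by unfold Spec_rangeSum; infer_instance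

-- ===== CLAIM (what is proved, stated in full; the proofs are below) =====
def Claim_equal_rangeSum : Prop := ∀ (nums : List Int) (n : Int) (left : Int) (right : Int), Dom_rangeSum nums n left right → Pre_rangeSum nums n left right → Spec_rangeSum nums n left right (rangeSum nums n left right)

-- ===== LEMMAS AND PROOFS =====

-- sum of nums[a:b] (indices read with pyGetD, exactly as the ports do)
def pvT (nums : List Int) (a b : Int) : Int :=
  ((PySem.List.pyRange a b 1).map (fun j => PySem.List.pyGetD nums j 0)).sum

lemma pvT_append (nums : List Int) {a b c : Int} (h1 : a ≤ b) (h2 : b ≤ c) :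
    pvT nums a b + pvT nums b c = pvT nums a c := by
  unfold pvT
  rw [PySem.List.pyRange_one_append a b c h1 h2, List.map_append, List.sum_append]

lemma pvT_single (nums : List Int) (a : Int) :
    pvT nums a (a + 1) = PySem.List.pyGetD nums a 0 := by
  unfold pvT
  rw [PySem.List.pyRange_one_singleton]
  simp

-- the running-sum scan both Pythons' `s += nums[k]; acc.append(s)` loops produce
def pvScan (nums : List Int) : List Int → Int → List Int
  | [], _ => []
  | j :: js, s =>
      (s + PySem.List.pyGetD nums j 0) :: pvScan nums js (s + PySem.List.pyGetD nums j 0)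

lemma pvFoldAcc (nums : List Int) : ∀ (js : List Int) (s : Int) (l : List Int),
    js.foldl (fun (p : Int × List Int) j =>
        (p.1 + PySem.List.pyGetD nums j 0, p.2 ++ [p.1 + PySem.List.pyGetD nums j 0])) (s, l)
      = (s + (js.map (fun j => PySem.List.pyGetD nums j 0)).sum, l ++ pvScan nums js s) := by
  intro js
  induction js with
  | nil => intro s l; simp [pvScan]
  | cons j js ih => intro s l; simp [pvScan, ih, add_assoc]

lemma pvScan_up (nums : List Int) : ∀ (a b : Int) (s : Int),
    pvScan nums (PySem.List.pyRange a b 1) s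
      = (PySem.List.pyRange a b 1).map (fun e => s + pvT nums a (e + 1)) := by
  intro a b
  induction hm : (b - a).toNat generalizing a with
  | zero =>
      intro s
      rw [PySem.List.pyRange_one_eq_nil (by omega)]
      simp [pvScan]
  | succ m ih =>
      intro s
      rw [PySem.List.pyRange_one_cons (by omega)]
      simp only [pvScan, List.map_cons]
      congr 1
      · rw [pvT_single]
      · rw [ih (a + 1) (by omega)]
        apply List.map_congr_left
        intro e he
        have hae := (PySem.List.mem_pyRange_one.mp he).1
        rw [← pvT_append nums (a := a) (b := a + 1) (c := e + 1) (by omega) (by omega),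
          pvT_single]
        ring

lemma pvScan_down (nums : List Int) : ∀ (a b : Int) (s : Int),
    pvScan nums (PySem.List.pyRange a b (-1)) s
      = (PySem.List.pyRange a b (-1)).map (fun k => s + pvT nums k (a + 1)) := by
  intro a b
  induction hm : (a - b).toNat generalizing a with
  | zero =>
      intro s
      rw [PySem.List.pyRange_neg_one_eq_nil (by omega)]
      simp [pvScan]
  | succ m ih =>
      intro s
      rw [PySem.List.pyRange_neg_one_cons (by omega)]
      simp only [pvScan, List.map_cons]
      congr 1
      · rw [pvT_single]
      · rw [ih (a - 1) (by omega)]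
        have ha : a - 1 + 1 = a := by ring
        rw [ha]
        apply List.map_congr_left
        intro k hk
        have hka := (PySem.List.mem_pyRange_neg_one.mp hk).2
        rw [← pvT_append nums (a := k) (b := a) (c := a + 1) (by omega) (by omega),
          pvT_single]
        ring

-- index shift: mapping f over e+1 for e in [a,b) is mapping f over [a+1,b+1)
lemma pvShift (f : Int → Int) (a b : Int) :
    (PySem.List.pyRange a b 1).map (fun e => f (e + 1))
      = (PySem.List.pyRange (a + 1) (b + 1) 1).map f := by
  rw [PySem.List.pyRange_one, PySem.List.pyRange_one]
  have h : (b + 1 - (a + 1)).toNat = (b - a).toNat := by omega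
  rw [h, List.map_map, List.map_map]
  apply List.map_congr_left
  intro k _
  show f (a + k + 1) = f (a + 1 + k)
  congr 1
  ring

lemma pvMerge_perm (a b : List Int) : (pvMerge a b).Perm (a ++ b) := by
  fun_induction pvMerge with
  | case1 b => simp
  | case2 a as => simp
  | case3 x xs y ys h ih =>
      simpa using ih.cons x
  | case4 x xs y ys h ih =>
      calc y :: pvMerge (x :: xs) ys
          |>.Perm (y :: (x :: xs ++ ys)) := ih.cons y
        _ |>.Perm (x :: xs ++ y :: ys) := (List.perm_middle).symm

lemma pvMerge_mem {a b : List Int} {z : Int} (h : z ∈ pvMerge a b) : z ∈ a ∨ z ∈ b := by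
  have := (pvMerge_perm a b).mem_iff.mp h
  simpa using this

lemma pvMerge_pairwise {a b : List Int} (ha : a.Pairwise (· ≤ ·)) (hb : b.Pairwise (· ≤ ·)) :
    (pvMerge a b).Pairwise (· ≤ ·) := by
  fun_induction pvMerge with
  | case1 b => exact hb
  | case2 a as => exact ha
  | case3 x xs y ys h ih =>
      rw [List.pairwise_cons] at ha ⊢
      refine ⟨fun z hz => ?_, ih ha.2 hb⟩
      rcases pvMerge_mem hz with hz | hz
      · exact ha.1 z hz
      · rw [List.pairwise_cons] at hb
        rcases List.mem_cons.mp hz with rfl | hz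
        · exact h
        · exact le_trans h (hb.1 z hz)
  | case4 x xs y ys h ih =>
      rw [List.pairwise_cons] at hb ⊢
      refine ⟨fun z hz => ?_, ih ha hb.2⟩
      rcases pvMerge_mem hz with hz | hz
      · rw [List.pairwise_cons] at ha
        rcases List.mem_cons.mp hz with rfl | hz
        · omega
        · exact le_trans (by omega) (ha.1 z hz)
      · exact hb.1 z hz

lemma pvMsort_perm (xs : List Int) : (pvMsort xs).Perm xs := by
  fun_induction pvMsort with
  | case1 xs h => exact List.Perm.refl xs
  | case2 xs h ih1 ih2 =>
      calc pvMerge (pvMsort (xs.take (xs.length / 2))) (pvMsort (xs.drop (xs.length / 2)))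
          |>.Perm (pvMsort (xs.take (xs.length / 2)) ++ pvMsort (xs.drop (xs.length / 2))) :=
            pvMerge_perm _ _
        _ |>.Perm (xs.take (xs.length / 2) ++ xs.drop (xs.length / 2)) := ih1.append ih2
        _ = xs := List.take_append_drop _ xs

lemma pvMsort_pairwise (xs : List Int) : (pvMsort xs).Pairwise (· ≤ ·) := by
  fun_induction pvMsort with
  | case1 xs h =>
      match xs, h with
      | [], _ => exact List.Pairwise.nil
      | [x], _ => simp
  | case2 xs h ih1 ih2 => exact pvMerge_pairwise ih1 ih2

lemma pvPairUp_flatten_perm (rs : List (List Int)) :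
    (pvPairUp rs).flatten.Perm rs.flatten := by
  fun_induction pvPairUp with
  | case1 a b rest ih =>
      simp only [List.flatten_cons]
      calc pvMerge a b ++ (pvPairUp rest).flatten
          |>.Perm ((a ++ b) ++ rest.flatten) := (pvMerge_perm a b).append ih
        _ = a ++ (b ++ rest.flatten) := by rw [List.append_assoc]
  | case2 rs _ => exact List.Perm.refl _

lemma pvPairUp_pairwise {rs : List (List Int)} (h : ∀ r ∈ rs, r.Pairwise (· ≤ ·)) :
    ∀ r ∈ pvPairUp rs, r.Pairwise (· ≤ ·) := by
  fun_induction pvPairUp with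
  | case1 a b rest ih =>
      intro r hr
      rcases List.mem_cons.mp hr with rfl | hr
      · exact pvMerge_pairwise (h a (by simp)) (h b (by simp))
      · exact ih (fun r hr => h r (by simp [hr])) r hr
  | case2 rs _ => exact h

lemma pvRounds_perm (rs : List (List Int)) : (pvRounds rs).Perm rs.flatten := by
  fun_induction pvRounds with
  | case1 => simp
  | case2 r => simp
  | case3 a b rest ih =>
      calc pvRounds (pvMerge a b :: pvPairUp rest)
          |>.Perm (pvMerge a b :: pvPairUp rest).flatten := ih
        _ |>.Perm (a :: b :: rest).flatten := by
            simp only [List.flatten_cons]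
            calc pvMerge a b ++ (pvPairUp rest).flatten
                |>.Perm ((a ++ b) ++ rest.flatten) :=
                  (pvMerge_perm a b).append (pvPairUp_flatten_perm rest)
              _ = a ++ (b ++ rest.flatten) := by rw [List.append_assoc]

lemma pvRounds_pairwise {rs : List (List Int)} (h : ∀ r ∈ rs, r.Pairwise (· ≤ ·)) :
    (pvRounds rs).Pairwise (· ≤ ·) := by
  fun_induction pvRounds with
  | case1 => exact List.Pairwise.nil
  | case2 r => exact h r (by simp)
  | case3 a b rest ih =>
      apply ih
      intro r hr
      rcases List.mem_cons.mp hr with rfl | hr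
      · exact pvMerge_pairwise (h a (by simp)) (h b (by simp))
      · exact pvPairUp_pairwise (fun r hr => h r (by simp [hr])) r hr

-- canonical (unsorted) list of subarray sums of nums[lo:hi]
def pvCanon (nums : List Int) (lo hi : Int) : List Int :=
  (PySem.List.pyRange lo hi 1).flatMap
    (fun k => (PySem.List.pyRange (k + 1) (hi + 1) 1).map (fun e => pvT nums k e))

lemma pvFlattenMap {α β : Type} (l : List α) (f : α → List β) :
    (l.map f).flatten = l.flatMap f := by
  rw [List.flatten_eq_flatMap, List.flatMap_map]
  rfl

lemma pvFlatMapAppendPerm (l : List Int) (f h : Int → List Int) :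
    (l.flatMap (fun a => f a ++ h a)).Perm (l.flatMap f ++ l.flatMap h) := by
  induction l with
  | nil => simp
  | cons a l ih =>
      simp only [List.flatMap_cons]
      have step : (h a ++ (l.flatMap f ++ l.flatMap h)).Perm
          (l.flatMap f ++ (h a ++ l.flatMap h)) := by
        calc h a ++ (l.flatMap f ++ l.flatMap h)
            = (h a ++ l.flatMap f) ++ l.flatMap h := by rw [List.append_assoc]
          _ |>.Perm ((l.flatMap f ++ h a) ++ l.flatMap h) :=
              (List.perm_append_comm).append_right _
          _ = l.flatMap f ++ (h a ++ l.flatMap h) := by rw [List.append_assoc]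
      calc (f a ++ h a) ++ l.flatMap (fun a => f a ++ h a)
          |>.Perm ((f a ++ h a) ++ (l.flatMap f ++ l.flatMap h)) := List.Perm.append_left _ ih
        _ = f a ++ (h a ++ (l.flatMap f ++ l.flatMap h)) := by rw [List.append_assoc]
        _ |>.Perm (f a ++ (l.flatMap f ++ (h a ++ l.flatMap h))) := List.Perm.append_left _ step
        _ = (f a ++ l.flatMap f) ++ (h a ++ l.flatMap h) := by rw [List.append_assoc]

lemma pvSolve_aux (nums : List Int) : ∀ (m : Nat) (lo hi : Int), (hi - lo).toNat ≤ m →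
    (pvSolve nums lo hi).Pairwise (· ≤ ·) ∧ (pvSolve nums lo hi).Perm (pvCanon nums lo hi) := by
  intro m
  induction m with
  | zero =>
      intro lo hi hle
      rw [pvSolve, if_pos (by omega : hi - lo ≤ 0)]
      refine ⟨List.Pairwise.nil, ?_⟩
      unfold pvCanon
      rw [PySem.List.pyRange_one_eq_nil (by omega)]
      simp
  | succ m ih =>
      intro lo hi hle
      by_cases h0 : hi - lo ≤ 0
      · rw [pvSolve, if_pos h0]
        refine ⟨List.Pairwise.nil, ?_⟩
        unfold pvCanon
        rw [PySem.List.pyRange_one_eq_nil (by omega)]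
        simp
      by_cases h1 : hi - lo = 1
      · rw [pvSolve, if_neg h0, if_pos h1]
        refine ⟨by simp, ?_⟩
        have hhi : hi = lo + 1 := by omega
        subst hhi
        unfold pvCanon
        rw [PySem.List.pyRange_one_singleton]
        simp only [List.flatMap_cons, List.flatMap_nil, List.append_nil]
        rw [PySem.List.pyRange_one_singleton]
        simp only [List.map_cons, List.map_nil, pvT_single]
        exact List.Perm.refl _
      -- main case: hi - lo ≥ 2
      rw [pvSolve, if_neg h0, if_neg h1]
      simp only []
      have hmid2 := PySem.Int.floordiv_eq_ediv_of_pos (a := lo + hi) (b := 2) (by norm_num)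
      have hlo : lo < PySem.Int.floordiv (lo + hi) 2 := by rw [hmid2]; omega
      have hhi : PySem.Int.floordiv (lo + hi) 2 < hi := by rw [hmid2]; omega
      set mid := PySem.Int.floordiv (lo + hi) 2 with hmiddef
      have ihL := ih lo mid (by omega)
      have ihR := ih mid hi (by omega)
      have hmid1 : mid - 1 + 1 = mid := by ring
      have hsuf : ((PySem.List.pyRange (mid - 1) (lo - 1) (-1)).foldl
          (fun (p : Int × List Int) k =>
            (p.1 + PySem.List.pyGetD nums k 0, p.2 ++ [p.1 + PySem.List.pyGetD nums k 0]))
          ((0 : Int), [])).2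
          = (PySem.List.pyRange (mid - 1) (lo - 1) (-1)).map (fun k => pvT nums k mid) := by
        rw [pvFoldAcc, pvScan_down]
        simp only [List.nil_append, zero_add, hmid1]
      have hpre : ((PySem.List.pyRange mid hi 1).foldl
          (fun (p : Int × List Int) e =>
            (p.1 + PySem.List.pyGetD nums e 0, p.2 ++ [p.1 + PySem.List.pyGetD nums e 0]))
          ((0 : Int), [])).2
          = (PySem.List.pyRange mid hi 1).map (fun e => pvT nums mid (e + 1)) := by
        rw [pvFoldAcc, pvScan_up]
        simp only [List.nil_append, zero_add]
      rw [hsuf, hpre]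
      set L := pvSolve nums lo mid
      set R := pvSolve nums mid hi
      set preS := pvMsort ((PySem.List.pyRange mid hi 1).map (fun e => pvT nums mid (e + 1)))
        with hpreS
      set rows := ((PySem.List.pyRange (mid - 1) (lo - 1) (-1)).map
        (fun k => pvT nums k mid)).map (fun s0 => preS.map (fun p => s0 + p)) with hrows
      have hrowsPW : ∀ r ∈ rows, r.Pairwise (· ≤ ·) := by
        intro r hr
        rw [hrows] at hr
        obtain ⟨s0, _, rfl⟩ := List.mem_map.mp hr
        rw [List.pairwise_map]
        exact (pvMsort_pairwise _).imp (by intro a b h; omega)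
      -- the canonical cross block
      set crossC := (PySem.List.pyRange lo mid 1).flatMap
        (fun k => (PySem.List.pyRange (mid + 1) (hi + 1) 1).map (fun e => pvT nums k e))
        with hcrossC
      have hcrossPerm : (pvRounds rows).Perm crossC := by
        have c1 : (pvRounds rows).Perm rows.flatten := pvRounds_perm rows
        have c2 : rows.flatten
            = ((PySem.List.pyRange (mid - 1) (lo - 1) (-1)).map
                (fun k => pvT nums k mid)).flatMap (fun s0 => preS.map (fun p => s0 + p)) := by
          rw [hrows, pvFlattenMap]
        have c3 : (((PySem.List.pyRange (mid - 1) (lo - 1) (-1)).map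
              (fun k => pvT nums k mid)).flatMap (fun s0 => preS.map (fun p => s0 + p))).Perm
            ((PySem.List.pyRange (mid - 1) (lo - 1) (-1)).flatMap
              (fun k => (PySem.List.pyRange (mid + 1) (hi + 1) 1).map (fun e => pvT nums k e))) := by
          rw [List.flatMap_map]
          apply List.Perm.flatMap_left
          intro k hk
          have hkb := (PySem.List.mem_pyRange_neg_one.mp hk)
          have hinner : (PySem.List.pyRange mid hi 1).map
              (fun e => pvT nums k mid + pvT nums mid (e + 1))
              = (PySem.List.pyRange (mid + 1) (hi + 1) 1).map (fun e => pvT nums k e) := by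
            rw [← pvShift (pvT nums k) mid hi]
            apply List.map_congr_left
            intro e he
            have heb := (PySem.List.mem_pyRange_one.mp he).1
            exact pvT_append nums (by omega) (by omega)
          calc (preS.map (fun p => pvT nums k mid + p))
              |>.Perm (((PySem.List.pyRange mid hi 1).map (fun e => pvT nums mid (e + 1))).map
                (fun p => pvT nums k mid + p)) := (pvMsort_perm _).map _
            _ = (PySem.List.pyRange mid hi 1).map
                (fun e => pvT nums k mid + pvT nums mid (e + 1)) := by rw [List.map_map]; rfl
            _ = (PySem.List.pyRange (mid + 1) (hi + 1) 1).map (fun e => pvT nums k e) := hinner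
        have c4 : ((PySem.List.pyRange (mid - 1) (lo - 1) (-1)).flatMap
              (fun k => (PySem.List.pyRange (mid + 1) (hi + 1) 1).map (fun e => pvT nums k e))).Perm
            crossC := by
          rw [hcrossC]
          have hrev : PySem.List.pyRange (mid - 1) (lo - 1) (-1)
              = (PySem.List.pyRange lo mid 1).reverse := by
            have e1 : lo - 1 + 1 = lo := by ring
            rw [PySem.List.pyRange_neg_one_eq_reverse, e1, hmid1]
          rw [hrev]
          exact List.Perm.flatMap (List.reverse_perm _) (fun a _ => List.Perm.refl _)
        exact ((c1.trans (c2 ▸ List.Perm.refl _)).trans c3).trans c4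
      refine ⟨?_, ?_⟩
      · exact pvMerge_pairwise (pvMerge_pairwise ihL.1 ihR.1) (pvRounds_pairwise hrowsPW)
      · -- permutation with the canonical list
        have hsplit : pvCanon nums lo hi |>.Perm
            ((pvCanon nums lo mid ++ pvCanon nums mid hi) ++ crossC) := by
          unfold pvCanon
          rw [PySem.List.pyRange_one_append lo mid hi (le_of_lt hlo) (le_of_lt hhi),
            List.flatMap_append]
          have hfirst : ((PySem.List.pyRange lo mid 1).flatMap
              (fun k => (PySem.List.pyRange (k + 1) (hi + 1) 1).map (fun e => pvT nums k e)))
              = (PySem.List.pyRange lo mid 1).flatMap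
                (fun k => (PySem.List.pyRange (k + 1) (mid + 1) 1).map (fun e => pvT nums k e)
                  ++ (PySem.List.pyRange (mid + 1) (hi + 1) 1).map (fun e => pvT nums k e)) := by
            apply List.flatMap_congr
            intro k hk
            have hkb := PySem.List.mem_pyRange_one.mp hk
            rw [PySem.List.pyRange_one_append (k + 1) (mid + 1) (hi + 1) (by omega) (by omega),
              List.map_append]
          rw [hfirst]
          have hP := pvFlatMapAppendPerm (PySem.List.pyRange lo mid 1)
            (fun k => (PySem.List.pyRange (k + 1) (mid + 1) 1).map (fun e => pvT nums k e))
            (fun k => (PySem.List.pyRange (mid + 1) (hi + 1) 1).map (fun e => pvT nums k e))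
          refine (hP.append_right _).trans ?_
          -- now: (canonL ++ crossC) ++ canonR  ~  (canonL ++ canonR) ++ crossC
          rw [← hcrossC, List.append_assoc, List.append_assoc]
          exact List.Perm.append_left _ List.perm_append_comm
        have hres : (pvMerge (pvMerge L R) (pvRounds rows)).Perm
            ((pvCanon nums lo mid ++ pvCanon nums mid hi) ++ crossC) :=
          calc pvMerge (pvMerge L R) (pvRounds rows)
            |>.Perm (pvMerge L R ++ pvRounds rows) := pvMerge_perm _ _
          _ |>.Perm ((L ++ R) ++ crossC) := (pvMerge_perm L R).append hcrossPerm
          _ |>.Perm ((pvCanon nums lo mid ++ pvCanon nums mid hi) ++ crossC) :=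
              (ihL.2.append ihR.2).append_right _
        exact hres.trans hsplit.symm

lemma pvSolve_spec (nums : List Int) (lo hi : Int) :
    (pvSolve nums lo hi).Pairwise (· ≤ ·) ∧ (pvSolve nums lo hi).Perm (pvCanon nums lo hi) :=
  pvSolve_aux nums (hi - lo).toNat lo hi (Nat.le_refl _)


lemma pvArrA (nums : List Int) (n : Int) :
    (PySem.List.pyRange 0 n 1).foldl (fun (arr : List Int) i =>
        ((PySem.List.pyRange i n 1).foldl (fun (p : Int × List Int) j =>
            (p.1 + PySem.List.pyGetD nums j 0, p.2 ++ [p.1 + PySem.List.pyGetD nums j 0]))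
          ((0 : Int), arr)).2) []
      = pvCanon nums 0 n := by
  have hrow : ∀ (arr : List Int) (i : Int),
      ((PySem.List.pyRange i n 1).foldl (fun (p : Int × List Int) j =>
          (p.1 + PySem.List.pyGetD nums j 0, p.2 ++ [p.1 + PySem.List.pyGetD nums j 0]))
        ((0 : Int), arr)).2
      = arr ++ (PySem.List.pyRange (i + 1) (n + 1) 1).map (fun e => pvT nums i e) := by
    intro arr i
    rw [pvFoldAcc, pvScan_up]
    simp only [zero_add]
    rw [pvShift (pvT nums i) i n]
  have hfun : (fun (arr : List Int) (i : Int) =>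
      ((PySem.List.pyRange i n 1).foldl (fun (p : Int × List Int) j =>
          (p.1 + PySem.List.pyGetD nums j 0, p.2 ++ [p.1 + PySem.List.pyGetD nums j 0]))
        ((0 : Int), arr)).2)
      = fun (arr : List Int) (i : Int) =>
          arr ++ (PySem.List.pyRange (i + 1) (n + 1) 1).map (fun e => pvT nums i e) := by
    funext arr i
    exact hrow arr i
  rw [hfun, PySem.List.foldl_append_eq_flatMap]
  rfl

lemma pvModFold (h : Int → Int) : ∀ (idx : List Int) (r : Int),
    idx.foldl (fun res i => PySem.Int.mod (res + h i) (10 ^ 9 + 7)) (PySem.Int.mod r (10 ^ 9 + 7))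
      = PySem.Int.mod (idx.foldl (fun res i => res + h i) r) (10 ^ 9 + 7) := by
  intro idx
  induction idx with
  | nil => intro r; rfl
  | cons i idx ih =>
      intro r
      simp only [List.foldl_cons]
      have hstep : PySem.Int.mod (PySem.Int.mod r (10 ^ 9 + 7) + h i) (10 ^ 9 + 7)
          = PySem.Int.mod (r + h i) (10 ^ 9 + 7) := by
        have hM : (0 : Int) < 10 ^ 9 + 7 := by norm_num
        rw [PySem.Int.mod_eq_emod_of_pos hM, PySem.Int.mod_eq_emod_of_pos hM,
          PySem.Int.mod_eq_emod_of_pos hM]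
        have hlit : ((10 : Int) ^ 9 + 7) = 1000000007 := by norm_num
        rw [hlit]
        omega
      rw [hstep, ih]

lemma pvModFold0 (h : Int → Int) (idx : List Int) :
    idx.foldl (fun res i => PySem.Int.mod (res + h i) (10 ^ 9 + 7)) 0
      = PySem.Int.mod (idx.foldl (fun res i => res + h i) 0) (10 ^ 9 + 7) := by
  have h0 : PySem.Int.mod 0 (10 ^ 9 + 7) = 0 := by
    have hM : (0 : Int) < 10 ^ 9 + 7 := by norm_num
    rw [PySem.Int.mod_eq_emod_of_pos hM]; simp
  have := pvModFold h idx 0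
  rwa [h0] at this

lemma pvMain (nums : List Int) (n : Int) (left : Int) (right : Int) :
    rangeSum nums n left right = rangeSum_alt nums n left right := by
  have hspec := pvSolve_spec nums 0 n
  have harr : PySem.List.sorted
      ((PySem.List.pyRange 0 n 1).foldl (fun (arr : List Int) i =>
        ((PySem.List.pyRange i n 1).foldl (fun (p : Int × List Int) j =>
            (p.1 + PySem.List.pyGetD nums j 0, p.2 ++ [p.1 + PySem.List.pyGetD nums j 0]))
          ((0 : Int), arr)).2) []) (fun x => x) false = pvSolve nums 0 n := by
    rw [pvArrA nums n]
    exact PySem.List.sorted_id_eq_of_perm_of_pairwise _ _ hspec.2 hspec.1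
  simp only [rangeSum, rangeSum_alt]
  rw [harr, pvModFold0]

-- ===== VERDICT (by name: the statement is the Claim_ definition above) =====
theorem rangeSum_spec : Claim_equal_rangeSum := by
  intro nums n left right _ _
  unfold Spec_rangeSum
  exact pvMain nums n left right
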